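-- pv_equiv track=rewrite | github.com/Hegemege/advent-of-code-2021 | 07/solution.py | part2
-- ===== SOURCE A (Python) =====
-- import math
--
-- def part2(input_data):
--     minx = min(input_data)
--     maxx = max(input_data)
--     lowest_fuel = math.inf
--     for i in range(minx, maxx + 1):
--         total_fuel = sum(map(lambda x: sum(range(1, abs(x - i) + 1)), input_data))
--         if total_fuel < lowest_fuel:
--             lowest_fuel = total_fuel
--
--     return lowest_fuel
-- ===== SOURCE B (Python) =====
-- def part2(input_data):
--     # Convex closed-form: cost(i) = sum of d*(d+1)//2; the integer minimizer
--     # lies at floor(mean) or floor(mean)+1, so evaluate only those two points.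
--     n = len(input_data)
--     s = sum(input_data)
--
--     def cost(i):
--         return sum(abs(x - i) * (abs(x - i) + 1) // 2 for x in input_data)
--
--     m = s // n
--     return min(cost(m), cost(m + 1))
-- ===== Notes on version B (the rewrite author's own statement) =====
-- stated objective: faster
-- what changed: Replaced the brute-force scan over every position in [min,max] with an inner unary sum-of-range per element by the closed-form triangular cost d*(d+1)//2 evaluated only at floor(mean) and floor(mean)+1, where the convex cost attains its minimum.
import Mathlib
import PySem

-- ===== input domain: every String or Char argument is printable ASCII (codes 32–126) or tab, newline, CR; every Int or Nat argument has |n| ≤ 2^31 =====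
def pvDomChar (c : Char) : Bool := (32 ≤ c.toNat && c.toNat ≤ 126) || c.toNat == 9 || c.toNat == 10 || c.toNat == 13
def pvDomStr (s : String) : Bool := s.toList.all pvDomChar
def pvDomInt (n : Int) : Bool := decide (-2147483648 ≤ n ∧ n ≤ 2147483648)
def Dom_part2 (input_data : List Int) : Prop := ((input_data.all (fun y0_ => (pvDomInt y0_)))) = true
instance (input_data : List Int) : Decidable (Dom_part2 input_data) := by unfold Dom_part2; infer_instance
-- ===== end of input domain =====

-- B replaces A's brute-force scan of every position by the closed-form triangular
-- cost evaluated only at floor(mean) and floor(mean)+1 (the convex minimum): faster.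

-- ===== PORT A =====
def part2 (input_data : List Int) : Int :=
  let minx := (PySem.List.min? input_data (fun x => x)).getD 0
  let maxx := (PySem.List.max? input_data (fun x => x)).getD 0
  let lowest := (PySem.List.pyRange minx (maxx + 1) 1).foldl
    (fun (acc : Option Int) i =>
      let total := (input_data.map (fun x => (PySem.List.pyRange 1 (|x - i| + 1) 1).sum)).sum
      match acc with
      | none => some total
      | some b => if total < b then some total else some b) none
  lowest.getD 0

-- ===== PORT B =====
def part2_alt (input_data : List Int) : Int :=
  let n : Int := input_data.length
  let s := input_data.sum
  let cost := fun (i : Int) =>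
    (input_data.map (fun x => PySem.Int.floordiv (|x - i| * (|x - i| + 1)) 2)).sum
  let m := PySem.Int.floordiv s n
  min (cost m) (cost (m + 1))

-- ===== PRECONDITION & SPEC =====
-- Pre_ excludes only the empty list, on which A raises ValueError (min of empty sequence).
def Pre_part2 (input_data : List Int) : Prop := input_data ≠ []
instance (input_data : List Int) : Decidable (Pre_part2 input_data) := by unfold Pre_part2; infer_instance
def pvWitness_part2 : List Int := ([2, 0, 7])

def Spec_part2 (input_data : List Int) (out : Int) : Prop := out = part2_alt input_data
instance (input_data : List Int) (out : Int) : Decidable (Spec_part2 input_data out) := by unfold Spec_part2; infer_instance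

-- ===== CLAIM (what is proved, stated in full; the proofs are below) =====
def Claim_equal_part2 : Prop := ∀ (input_data : List Int), Dom_part2 input_data → Pre_part2 input_data → Spec_part2 input_data (part2 input_data)

-- ===== LEMMAS AND PROOFS =====

-- triangular numbers, recursively (shared mathematical spine)
def triN : Nat → Nat
  | 0 => 0
  | d + 1 => triN d + (d + 1)

-- the common cost function
def Fc (l : List Int) (i : Int) : Int := (l.map (fun x => (triN (x - i).natAbs : Int))).sum

theorem sum_pyRange_tri (d : Nat) :
    (PySem.List.pyRange 1 ((d : Int) + 1) 1).sum = (triN d : Int) := by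
  induction d with
  | zero => simp [PySem.List.pyRange_one_eq_nil, triN]
  | succ k ih =>
    have h : (1 : Int) ≤ (k : Int) + 1 := by omega
    have : ((k + 1 : Nat) : Int) + 1 = ((k : Int) + 1) + 1 := by push_cast; ring
    rw [this, PySem.List.pyRange_one_succ_right h]
    simp only [List.sum_append, List.sum_cons, List.sum_nil, ih, triN]
    push_cast; ring

theorem triN_two_mul (d : Nat) : 2 * triN d = d * (d + 1) := by
  induction d with
  | zero => rfl
  | succ k ih => simp [triN]; ring_nf; ring_nf at ih; omega

theorem floordiv_tri (d : Nat) :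
    PySem.Int.floordiv ((d : Int) * ((d : Int) + 1)) 2 = (triN d : Int) := by
  rw [PySem.Int.floordiv_eq_ediv_of_pos (by norm_num)]
  have h : ((d : Int) * ((d : Int) + 1)) = 2 * (triN d : Int) := by
    have := triN_two_mul d
    nlinarith [this]
  rw [h, Int.mul_ediv_cancel_left _ (by norm_num)]

theorem costA_eq_Fc (l : List Int) (i : Int) :
    (l.map (fun x => (PySem.List.pyRange 1 (|x - i| + 1) 1).sum)).sum = Fc l i := by
  unfold Fc
  congr 1
  apply List.map_congr_left
  intro x _
  have : |x - i| = ((x - i).natAbs : Int) := (Int.abs_eq_natAbs _)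
  rw [this, sum_pyRange_tri]

theorem costB_eq_Fc (l : List Int) (i : Int) :
    (l.map (fun x => PySem.Int.floordiv (|x - i| * (|x - i| + 1)) 2)).sum = Fc l i := by
  unfold Fc
  congr 1
  apply List.map_congr_left
  intro x _
  have : |x - i| = ((x - i).natAbs : Int) := (Int.abs_eq_natAbs _)
  rw [this, floordiv_tri]

-- per-element step of the cost
theorem tri_step (x i : Int) :
    (triN (x - (i + 1)).natAbs : Int)
      = (triN (x - i).natAbs : Int) + (i - x) + (if x ≤ i then 1 else 0) := by
  by_cases h : x ≤ i
  · have h1 : (x - (i + 1)).natAbs = (x - i).natAbs + 1 := by omega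
    have h2 : ((x - i).natAbs : Int) = i - x := by omega
    rw [h1, if_pos h]
    have h3 : triN ((x - i).natAbs + 1) = triN (x - i).natAbs + ((x - i).natAbs + 1) := rfl
    rw [h3]
    push_cast
    have hab : |x - i| = i - x := by rw [abs_of_nonpos (by omega : x - i ≤ 0)]; ring
    omega
  · have h1 : (x - i).natAbs = (x - (i + 1)).natAbs + 1 := by omega
    have h2 : (((x - (i + 1)).natAbs : Int)) = x - i - 1 := by omega
    rw [h1, if_neg h]
    have h3 : triN ((x - (i + 1)).natAbs + 1) = triN (x - (i + 1)).natAbs + ((x - (i + 1)).natAbs + 1) := rfl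
    rw [h3]
    push_cast
    have hab : |x - (i + 1)| = x - i - 1 := by rw [abs_of_nonneg (by omega : (0:Int) ≤ x - (i + 1))]; ring
    omega

-- aggregated step formula
theorem Fc_step (l : List Int) (i : Int) :
    Fc l (i + 1) = Fc l i + ((l.length : Int) * i - l.sum
      + (l.countP (fun x => decide (x ≤ i)) : Int)) := by
  induction l with
  | nil => simp [Fc]
  | cons x t ih =>
    simp only [Fc, List.map_cons, List.sum_cons, List.length_cons, List.sum_cons,
      List.countP_cons] at *
    rw [tri_step x i]
    by_cases h : x ≤ i
    · simp only [h, decide_true]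
      push_cast
      linarith [ih]
    · simp only [h, decide_false]
      push_cast
      linarith [ih]

theorem Fc_step_down (l : List Int) (i : Int)
    (h : (l.length : Int) * (i + 1) ≤ l.sum) : Fc l (i + 1) ≤ Fc l i := by
  have hs := Fc_step l i
  have hc : (l.countP (fun x => decide (x ≤ i)) : Int) ≤ (l.length : Int) := by
    exact_mod_cast l.countP_le_length
  nlinarith

theorem Fc_step_up (l : List Int) (i : Int)
    (h : l.sum + 1 ≤ (l.length : Int) * i) : Fc l i ≤ Fc l (i + 1) := by
  have hs := Fc_step l i
  have hc : (0 : Int) ≤ (l.countP (fun x => decide (x ≤ i)) : Int) := by positivity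
  linarith

theorem Fc_mono_down (l : List Int) (m : Int) (hm : (l.length : Int) * m ≤ l.sum) :
    ∀ (k : Nat) (j : Int), j + k = m → Fc l m ≤ Fc l j := by
  intro k
  induction k with
  | zero =>
    intro j hj
    have hjm : j = m := by omega
    rw [hjm]
  | succ p ih =>
    intro j hj
    have h1 : (j + 1) + (p : Int) = m := by push_cast at hj ⊢; omega
    have h2 : Fc l m ≤ Fc l (j + 1) := ih (j + 1) h1
    have h3 : (l.length : Int) * (j + 1) ≤ l.sum := by
      have hj1 : j + 1 ≤ m := by omega
      have hn : (0 : Int) ≤ (l.length : Int) := by positivity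
      nlinarith
    exact le_trans h2 (Fc_step_down l j h3)

theorem Fc_mono_up (l : List Int) (m : Int) (hm : l.sum + 1 ≤ (l.length : Int) * (m + 1)) :
    ∀ (k : Nat) (j : Int), j = m + 1 + k → Fc l (m + 1) ≤ Fc l j := by
  intro k
  induction k with
  | zero => intro j hj; simp at hj; simp [hj]
  | succ p ih =>
    intro j hj
    have h2 : Fc l (m + 1) ≤ Fc l (m + 1 + p) := ih (m + 1 + p) rfl
    have h3 : l.sum + 1 ≤ (l.length : Int) * (m + 1 + p) := by
      have hn : (0 : Int) ≤ (l.length : Int) := by positivity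
      nlinarith
    have h4 : Fc l (m + 1 + p) ≤ Fc l (m + 1 + p + 1) := Fc_step_up l (m + 1 + p) h3
    have hj' : j = m + 1 + p + 1 := by push_cast at hj; omega
    rw [hj']
    exact le_trans h2 h4

-- A's loop with Option accumulator, for an arbitrary cost g
theorem foldA_some (g : Int → Int) (cs : List Int) : ∀ (b : Int),
    cs.foldl (fun (acc : Option Int) i =>
        match acc with
        | none => some (g i)
        | some b => if g i < b then some (g i) else some b) (some b)
      = some (cs.foldl (fun a i => min a (g i)) b) := by
  induction cs with
  | nil => intro b; rfl
  | cons c t ih =>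
    intro b
    simp only [List.foldl_cons]
    have h : (if g c < b then some (g c) else some b) = some (min b (g c)) := by
      split_ifs with h1
      · rw [min_eq_right (le_of_lt h1)]
      · rw [min_eq_left (le_of_not_gt h1)]
    rw [h, ih]

theorem foldmin_le_init (g : Int → Int) (cs : List Int) : ∀ (b : Int),
    cs.foldl (fun a i => min a (g i)) b ≤ b := by
  induction cs with
  | nil => intro b; simp
  | cons c t ih =>
    intro b
    simp only [List.foldl_cons]
    exact le_trans (ih (min b (g c))) (min_le_left _ _)

theorem foldmin_le_mem (g : Int → Int) (cs : List Int) : ∀ (b : Int), ∀ i ∈ cs,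
    cs.foldl (fun a i => min a (g i)) b ≤ g i := by
  induction cs with
  | nil => intro b i hi; simp at hi
  | cons c t ih =>
    intro b i hi
    simp only [List.foldl_cons]
    rcases List.mem_cons.mp hi with h | h
    · subst h
      exact le_trans (foldmin_le_init g t _) (min_le_right _ _)
    · exact ih _ i h

theorem foldmin_cases (g : Int → Int) (cs : List Int) : ∀ (b : Int),
    cs.foldl (fun a i => min a (g i)) b = b ∨
      ∃ i ∈ cs, cs.foldl (fun a i => min a (g i)) b = g i := by
  induction cs with
  | nil => intro b; left; rfl
  | cons c t ih =>
    intro b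
    simp only [List.foldl_cons]
    rcases ih (min b (g c)) with h | hex
    · rcases min_cases b (g c) with he | he
      · left; rw [h, he.1]
      · right; exact ⟨c, List.mem_cons_self, by rw [h, he.1]⟩
    · obtain ⟨i, hi, h⟩ := hex
      right; exact ⟨i, List.mem_cons_of_mem _ hi, h⟩

theorem length_mul_le_sum (l : List Int) (a : Int) (h : ∀ x ∈ l, a ≤ x) :
    (l.length : Int) * a ≤ l.sum := by
  induction l with
  | nil => simp
  | cons x t ih =>
    have hx := h x List.mem_cons_self
    have ht := ih (fun y hy => h y (List.mem_cons_of_mem _ hy))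
    simp only [List.length_cons, List.sum_cons]
    push_cast
    nlinarith

theorem sum_le_length_mul (l : List Int) (a : Int) (h : ∀ x ∈ l, x ≤ a) :
    l.sum ≤ (l.length : Int) * a := by
  induction l with
  | nil => simp
  | cons x t ih =>
    have hx := h x List.mem_cons_self
    have ht := ih (fun y hy => h y (List.mem_cons_of_mem _ hy))
    simp only [List.length_cons, List.sum_cons]
    push_cast
    nlinarith

-- ===== VERDICT (by name: the statement is the Claim_ definition above) =====
theorem part2_spec : Claim_equal_part2 := by
  intro l _ hpre
  unfold Spec_part2
  obtain ⟨mn, hmin⟩ : ∃ mn, PySem.List.min? l (fun x => x) = some mn := by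
    cases h : PySem.List.min? l (fun x => x) with
    | none => exact absurd ((PySem.List.min?_eq_none_iff l (fun x => x)).mp h) hpre
    | some v => exact ⟨v, rfl⟩
  obtain ⟨mx, hmax⟩ : ∃ mx, PySem.List.max? l (fun x => x) = some mx := by
    cases h : PySem.List.max? l (fun x => x) with
    | none => exact absurd ((PySem.List.max?_eq_none_iff l (fun x => x)).mp h) hpre
    | some v => exact ⟨v, rfl⟩
  have hmn_mem : mn ∈ l := PySem.List.min?_mem hmin
  have hmn_min : ∀ y ∈ l, mn ≤ y := PySem.List.min?_isMin hmin
  have hmx_max : ∀ y ∈ l, y ≤ mx := PySem.List.max?_isMax hmax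
  have hmnmx : mn ≤ mx := hmx_max mn hmn_mem
  set N : Int := (l.length : Int) with hN
  set S : Int := l.sum with hS
  have hNpos : 0 < N := by
    rw [hN]
    have : l.length ≠ 0 := fun h => hpre (List.eq_nil_of_length_eq_zero h)
    omega
  set m : Int := PySem.Int.floordiv S N with hm
  have hfd : m = S / N := by rw [hm, PySem.Int.floordiv_eq_ediv_of_pos hNpos]
  have e1 : N * (S / N) + S % N = S := Int.mul_ediv_add_emod S N
  have e2 : 0 ≤ S % N := Int.emod_nonneg S (ne_of_gt hNpos)
  have e3 : S % N < N := Int.emod_lt_of_pos S hNpos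
  have hml : N * m ≤ S := by rw [hfd]; linarith
  have hmu : S + 1 ≤ N * (m + 1) := by
    have : N * (m + 1) = N * (S / N) + N := by rw [hfd]; ring
    linarith
  have hlow : N * mn ≤ S := length_mul_le_sum l mn hmn_min
  have hhigh : S ≤ N * mx := sum_le_length_mul l mx hmx_max
  have hmnm : mn ≤ m := by nlinarith
  have hmmx : m ≤ mx := by nlinarith
  have hA : part2 l = (PySem.List.pyRange (mn + 1) (mx + 1) 1).foldl
      (fun a i => min a (Fc l i)) (Fc l mn) := by
    simp only [part2, hmin, hmax, Option.getD_some]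
    rw [PySem.List.pyRange_one_cons (by omega : mn < mx + 1)]
    simp only [List.foldl_cons]
    rw [foldA_some (fun i => (l.map (fun x => (PySem.List.pyRange 1 (|x - i| + 1) 1).sum)).sum)]
    rw [Option.getD_some]
    rw [costA_eq_Fc l mn]
    have hfun : (fun (a i : Int) => min a ((l.map (fun x => (PySem.List.pyRange 1 (|x - i| + 1) 1).sum)).sum))
        = fun (a i : Int) => min a (Fc l i) := by
      funext a i
      rw [costA_eq_Fc]
    rw [hfun]
  have hB : part2_alt l = min (Fc l m) (Fc l (m + 1)) := by
    simp only [part2_alt, costB_eq_Fc, ← hN, ← hS, ← hm]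
  rw [hA, hB]
  set rest := PySem.List.pyRange (mn + 1) (mx + 1) 1 with hrest
  have hmemrest : ∀ i : Int, mn + 1 ≤ i → i ≤ mx → i ∈ rest := by
    intro i h1 h2
    rw [hrest, PySem.List.mem_pyRange_one]
    omega
  have hRle : ∀ i : Int, mn ≤ i → i ≤ mx →
      rest.foldl (fun a i => min a (Fc l i)) (Fc l mn) ≤ Fc l i := by
    intro i h1 h2
    rcases eq_or_lt_of_le h1 with h | h
    · rw [← h]; exact foldmin_le_init _ _ _
    · exact foldmin_le_mem _ _ _ i (hmemrest i (by omega) h2)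
  apply le_antisymm
  · apply le_min
    · exact hRle m hmnm hmmx
    · by_cases hcase : m + 1 ≤ mx
      · exact hRle (m + 1) (by omega) hcase
      · have hmeq : m = mx := by omega
        have hstep := Fc_step l m
        have hcall : l.countP (fun x => decide (x ≤ m)) = l.length :=
          List.countP_eq_length.mpr (fun x hx => by
            simpa using le_trans (hmx_max x hx) (le_of_eq hmeq.symm))
        rw [hcall] at hstep
        have hFm : Fc l m ≤ Fc l (m + 1) := by
          rw [hstep, ← hN, ← hS]
          nlinarith
        exact le_trans (hRle m hmnm hmmx) hFm
  · have key : ∀ j : Int, mn ≤ j → j ≤ mx →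
        min (Fc l m) (Fc l (m + 1)) ≤ Fc l j := by
      intro j h1 h2
      by_cases hj : j ≤ m
      · have hd : Fc l m ≤ Fc l j := by
          apply Fc_mono_down l m hml (m - j).toNat j
          omega
        exact le_trans (min_le_left _ _) hd
      · have hu : Fc l (m + 1) ≤ Fc l j := by
          apply Fc_mono_up l m hmu (j - (m + 1)).toNat j
          omega
        exact le_trans (min_le_right _ _) hu
    rcases foldmin_cases (Fc l) rest (Fc l mn) with h | hex
    · rw [h]; exact key mn (le_refl _) hmnmx
    · obtain ⟨j, hj, h⟩ := hex
      rw [h]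
      rw [hrest, PySem.List.mem_pyRange_one] at hj
      exact key j (by omega) (by omega)
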